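-- pv_equiv track=rewrite | github.com/jonewei/ME-IR | scripts/build_ipi_index.py | extract_structural_paths
-- ===== SOURCE A (Python) =====
-- def extract_structural_paths(latex):
--     """
--     LS-MIR 核心算法：提取结构路径
--     这里实现一个基于符号深度的简化版拓扑提取逻辑
--     """
--     tokens = latex.replace('{', ' { ').replace('}', ' } ').replace('\\', ' \\').split()
--     paths = []
--     stack = []
--
--     for t in tokens:
--         if t == '{':
--             stack.append("sub")
--         elif t == '}':
--             if stack: stack.pop()
--         else:
--             # 构造路径：层级 + 符号 (例如: sub_sub_alpha)
--             path = "_".join(stack + [t])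
--             if len(t) > 1 or t.isalpha(): # 过滤掉简单的括号和单字符
--                 paths.append(path)
--     return paths
-- ===== SOURCE B (Python) =====
-- def extract_structural_paths(latex):
--     """Recursive-descent version: a shared cursor and walk(depth) replace the explicit stack."""
--     tokens = latex.replace('{', ' { ').replace('}', ' } ').replace('\\', ' \\').split()
--     paths = []
--     pos = 0
--
--     def walk(depth):
--         nonlocal pos
--         while pos < len(tokens):
--             t = tokens[pos]
--             pos += 1
--             if t == '{':
--                 walk(depth + 1)
--             elif t == '}':
--                 return
--             elif len(t) > 1 or t.isalpha():
--                 paths.append("_".join(["sub"] * depth + [t]))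
--
--     while pos < len(tokens):
--         walk(0)
--     return paths
-- ===== Notes on version B (the rewrite author's own statement) =====
-- stated objective: alternative
-- what changed: Keeps A's tokenizer but replaces the explicit brace stack and per-token join over it by a recursive-descent parser: a shared cursor with walk(depth) that recurses on '{', returns on '}', and builds each path from its depth parameter, driven by an outer loop that resumes after a stray top-level '}'.
import Mathlib
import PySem

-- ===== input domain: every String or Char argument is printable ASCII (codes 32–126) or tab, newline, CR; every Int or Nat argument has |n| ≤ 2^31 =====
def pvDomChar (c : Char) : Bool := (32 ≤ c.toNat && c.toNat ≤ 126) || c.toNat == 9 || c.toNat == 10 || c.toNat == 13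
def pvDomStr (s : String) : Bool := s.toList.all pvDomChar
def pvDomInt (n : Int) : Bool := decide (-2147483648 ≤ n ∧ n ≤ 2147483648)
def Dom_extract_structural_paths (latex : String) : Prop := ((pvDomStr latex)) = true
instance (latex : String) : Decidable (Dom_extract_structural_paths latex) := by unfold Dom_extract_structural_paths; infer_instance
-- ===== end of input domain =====

-- B replaces A's explicit brace stack by a recursive-descent walk with a depth parameter (same tokenizer, different decomposition; no speed claim).

-- ===== PORT A =====
-- literal port of A: tokenize, then one fold carrying (paths, stack)
def extract_structural_paths (latex : String) : List String :=
  let tokens := PySem.Str.split₀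
    (PySem.Str.replace (PySem.Str.replace (PySem.Str.replace latex "{" " { ") "}" " } ") "\\" " \\")
  (tokens.foldl (fun (st : List String × List String) t =>
      if t = "{" then (st.1, st.2 ++ ["sub"])
      else if t = "}" then (st.1, if st.2 ≠ [] then st.2.dropLast else st.2)
      else
        let path := PySem.Str.join "_" (st.2 ++ [t])
        if 1 < PySem.Str.len t ∨ PySem.Str.strIsalpha t then (st.1 ++ [path], st.2)
        else (st.1, st.2))
    ([], [])).1

-- ===== PORT B =====
-- B's path construction: "_".join(["sub"]*depth + [t])
def pvJoinPath (depth : Nat) (t : String) : String :=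
  PySem.Str.join "_" (List.replicate depth "sub" ++ [t])

-- B's walk(depth): consumes tokens from the front, recursing on '{', returning on '}'.
-- The subtype invariant (remaining suffix never grows / strictly shrinks on nonempty input)
-- only certifies termination of this recursion and of the driver below.
def pvWalk (depth : Nat) (paths : List String) :
    (ts : List String) →
      {p : List String × List String // p.2.length ≤ ts.length ∧ (ts ≠ [] → p.2.length < ts.length)}
  | [] => ⟨(paths, []), Nat.le_refl _, fun h => absurd rfl h⟩
  | t :: rest =>
    if t = "{" then
      let r := pvWalk (depth + 1) paths rest
      let r2 := pvWalk depth r.1.1 r.1.2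
      ⟨r2.1, Nat.le_trans r2.2.1 (Nat.le_trans r.2.1 (Nat.le_succ _)),
        fun _ => Nat.lt_succ_of_le (Nat.le_trans r2.2.1 r.2.1)⟩
    else if t = "}" then
      ⟨(paths, rest), Nat.le_succ _, fun _ => Nat.lt_succ_of_le (Nat.le_refl _)⟩
    else
      let paths' := if 1 < PySem.Str.len t ∨ PySem.Str.strIsalpha t
        then paths ++ [pvJoinPath depth t] else paths
      let r := pvWalk depth paths' rest
      ⟨r.1, Nat.le_trans r.2.1 (Nat.le_succ _), fun _ => Nat.lt_succ_of_le r.2.1⟩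
termination_by ts => ts.length
decreasing_by
  all_goals first
    | exact Nat.lt_succ_of_le r.2.1
    | exact Nat.lt_succ_of_le (Nat.le_refl _)

-- B's outer driver: while pos < len(tokens): walk(0)
def pvDrive (paths : List String) (ts : List String) : List String :=
  match ts with
  | [] => paths
  | t :: rest =>
    let r := pvWalk 0 paths (t :: rest)
    pvDrive r.1.1 r.1.2
termination_by ts.length
decreasing_by exact r.2.2 (by simp)

def extract_structural_paths_alt (latex : String) : List String :=
  let tokens := PySem.Str.split₀
    (PySem.Str.replace (PySem.Str.replace (PySem.Str.replace latex "{" " { ") "}" " } ") "\\" " \\")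
  pvDrive [] tokens

-- ===== PRECONDITION & SPEC =====
def Spec_extract_structural_paths (latex : String) (out : List String) : Prop := out = extract_structural_paths_alt latex
instance (latex : String) (out : List String) : Decidable (Spec_extract_structural_paths latex out) := by unfold Spec_extract_structural_paths; infer_instance

-- ===== CLAIM (what is proved, stated in full; the proofs are below) =====
def Claim_equal_extract_structural_paths : Prop := ∀ (latex : String), Dom_extract_structural_paths latex → Spec_extract_structural_paths latex (extract_structural_paths latex)

-- ===== LEMMAS AND PROOFS =====

-- A's fold step, named for the proofs
def pvStepA (st : List String × List String) (t : String) : List String × List String :=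
  if t = "{" then (st.1, st.2 ++ ["sub"])
  else if t = "}" then (st.1, if st.2 ≠ [] then st.2.dropLast else st.2)
  else
    let path := PySem.Str.join "_" (st.2 ++ [t])
    if 1 < PySem.Str.len t ∨ PySem.Str.strIsalpha t then (st.1 ++ [path], st.2)
    else (st.1, st.2)

theorem pvStepA_open (paths : List String) (n : Nat) :
    pvStepA (paths, List.replicate n "sub") "{" = (paths, List.replicate (n + 1) "sub") := by
  simp [pvStepA, List.replicate_succ']

theorem pvStepA_close (paths : List String) (n : Nat) :
    pvStepA (paths, List.replicate n "sub") "}" = (paths, List.replicate (n - 1) "sub") := by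
  cases n with
  | zero => simp [pvStepA]
  | succ m =>
    simp [pvStepA, List.replicate_succ']

theorem pvStepA_tok (paths : List String) (n : Nat) (t : String)
    (hb : ¬ t = "{") (hc : ¬ t = "}") :
    pvStepA (paths, List.replicate n "sub") t
      = ((if 1 < PySem.Str.len t ∨ PySem.Str.strIsalpha t then paths ++ [pvJoinPath n t] else paths),
          List.replicate n "sub") := by
  simp only [pvStepA, if_neg hb, if_neg hc, pvJoinPath]
  split <;> rfl

-- main invariant: A's fold from depth n equals one pvWalk call followed by the fold at depth n-1
theorem pvMain : ∀ (N : Nat) (ts : List String), ts.length ≤ N → ∀ (n : Nat) (paths : List String),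
    (List.foldl pvStepA (paths, List.replicate n "sub") ts).1
      = (List.foldl pvStepA ((pvWalk n paths ts).1.1, List.replicate (n - 1) "sub")
          (pvWalk n paths ts).1.2).1 := by
  intro N
  induction N with
  | zero =>
    intro ts h n paths
    have : ts = [] := List.eq_nil_of_length_eq_zero (Nat.le_zero.mp h)
    subst this
    simp [pvWalk]
  | succ N IH =>
    intro ts h n paths
    match ts with
    | [] => simp [pvWalk]
    | t :: rest =>
      have hrest : rest.length ≤ N := by simp only [List.length_cons] at h; omega
      by_cases hb : t = "{"
      · subst hb
        have e1 : (pvWalk n paths ("{" :: rest)).1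
            = (pvWalk n (pvWalk (n + 1) paths rest).1.1 (pvWalk (n + 1) paths rest).1.2).1 := by
          simp [pvWalk]
        rw [List.foldl_cons, pvStepA_open, e1]
        rw [IH rest hrest (n + 1) paths]
        simp only [Nat.add_sub_cancel]
        exact IH (pvWalk (n + 1) paths rest).1.2
          (Nat.le_trans (pvWalk (n + 1) paths rest).2.1 hrest) n (pvWalk (n + 1) paths rest).1.1
      · by_cases hc : t = "}"
        · subst hc
          have e1 : (pvWalk n paths ("}" :: rest)).1 = (paths, rest) := by
            simp [pvWalk]
          rw [List.foldl_cons, pvStepA_close, e1]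
        · have e1 : (pvWalk n paths (t :: rest)).1
              = (pvWalk n (if 1 < PySem.Str.len t ∨ PySem.Str.strIsalpha t
                  then paths ++ [pvJoinPath n t] else paths) rest).1 := by
            simp [pvWalk, hb, hc]
          rw [List.foldl_cons, pvStepA_tok paths n t hb hc, e1]
          exact IH rest hrest n _

-- the driver iterates pvWalk 0 exactly as the depth-0 fold does
theorem pvDrive_eq : ∀ (N : Nat) (ts : List String), ts.length ≤ N → ∀ (paths : List String),
    (List.foldl pvStepA (paths, ([] : List String)) ts).1 = pvDrive paths ts := by
  intro N
  induction N with
  | zero =>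
    intro ts h paths
    have : ts = [] := List.eq_nil_of_length_eq_zero (Nat.le_zero.mp h)
    subst this
    simp [pvDrive]
  | succ N IH =>
    intro ts h paths
    match ts with
    | [] => simp [pvDrive]
    | t :: rest =>
      have hm := pvMain (N + 1) (t :: rest) h 0 paths
      have h0 : (List.replicate 0 "sub" : List String) = [] := rfl
      rw [h0] at hm
      rw [hm]
      have hlt : (pvWalk 0 paths (t :: rest)).1.2.length ≤ N := by
        have := (pvWalk 0 paths (t :: rest)).2.2 (by simp)
        simp only [List.length_cons] at this h
        omega
      rw [IH (pvWalk 0 paths (t :: rest)).1.2 hlt (pvWalk 0 paths (t :: rest)).1.1]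
      conv_rhs => rw [pvDrive]

-- ===== VERDICT (by name: the statement is the Claim_ definition above) =====
theorem extract_structural_paths_spec : Claim_equal_extract_structural_paths := by
  intro latex _
  show extract_structural_paths latex = extract_structural_paths_alt latex
  unfold extract_structural_paths extract_structural_paths_alt
  exact pvDrive_eq _ _ (Nat.le_refl _) []
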